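-- pv_equiv track=rewrite | github.com/maalbash/TinyGenProject | src/diff_applier.py | _extract_new_file_content
-- ===== SOURCE A (Python) =====
-- def _extract_new_file_content(section: str) -> str:
--     """Extract content for a new file."""
--     lines = section.split('\n')
--     content_lines = []
--
--     in_content = False
--     for line in lines:
--         if line.startswith('@@'):
--             in_content = True
--             continue
--         elif in_content and line.startswith('+'):
--             content_lines.append(line[1:])  # Remove '+' prefix
--
--     return '\n'.join(content_lines)
-- ===== SOURCE B (Python) =====
-- def _extract_new_file_content(section: str) -> str:
--     """Extract content for a new file."""
--     lines = section.split('\n')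
--     # drop everything up to and including the first '@@' header line
--     tail = None
--     for i, line in enumerate(lines):
--         if line.startswith('@@'):
--             tail = lines[i + 1:]
--             break
--     if tail is None:
--         return ''
--     return '\n'.join(l[1:] for l in tail if l.startswith('+'))
-- ===== Notes on version B (the rewrite author's own statement) =====
-- stated objective: idiomatic
-- what changed: Replaces the mutable in_content flag and accumulator list with a two-phase pipeline: locate the first '@@' header line, then filter-and-join the '+' lines of the tail.
import Mathlib
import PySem

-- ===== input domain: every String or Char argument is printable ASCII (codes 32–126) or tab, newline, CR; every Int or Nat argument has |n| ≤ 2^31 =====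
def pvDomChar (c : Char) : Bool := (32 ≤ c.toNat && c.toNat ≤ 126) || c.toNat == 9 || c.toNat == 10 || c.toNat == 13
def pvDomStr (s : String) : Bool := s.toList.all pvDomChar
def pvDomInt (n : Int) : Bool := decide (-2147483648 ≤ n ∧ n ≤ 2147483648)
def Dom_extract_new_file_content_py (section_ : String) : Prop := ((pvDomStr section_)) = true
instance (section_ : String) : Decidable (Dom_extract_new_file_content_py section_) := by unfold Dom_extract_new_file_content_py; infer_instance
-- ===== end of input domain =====

-- B replaces A's mutable in_content flag with a find-the-'@@'-header-then-filter pipeline (idiomatic decomposition, same cost).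

-- ===== PORT A =====
-- one loop iteration of A: ('@@' sets the flag; '+' lines append their tail when the flag is set)
def pvStepA (st : Bool × List String) (line : String) : Bool × List String :=
  if PySem.Str.startswith line "@@" then (true, st.2)
  else if st.1 && PySem.Str.startswith line "+" then (st.1, st.2 ++ [PySem.Str.slice line (some 1) none])
  else st

def extract_new_file_content_py (section_ : String) : String :=
  -- section.split('\n'): the separator is the nonempty literal "\n", so split? is always some
  let lines := (PySem.Str.split? section_ "\n").getD []
  let st := lines.foldl pvStepA (false, [])
  PySem.Str.join "\n" st.2

-- ===== PORT B =====
def extract_new_file_content_py_alt (section_ : String) : String :=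
  let lines := (PySem.Str.split? section_ "\n").getD []
  match lines.dropWhile (fun l => !PySem.Str.startswith l "@@") with
  | [] => ""
  | _ :: rest =>
      PySem.Str.join "\n"
        ((rest.filter (fun l => PySem.Str.startswith l "+")).map
          (fun l => PySem.Str.slice l (some 1) none))

-- ===== PRECONDITION & SPEC =====
def Spec_extract_new_file_content_py (section_ : String) (out : String) : Prop := out = extract_new_file_content_py_alt section_
instance (section_ : String) (out : String) : Decidable (Spec_extract_new_file_content_py section_ out) := by unfold Spec_extract_new_file_content_py; infer_instance

-- ===== CLAIM (what is proved, stated in full; the proofs are below) =====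
def Claim_equal_extract_new_file_content_py : Prop := ∀ (section_ : String), Dom_extract_new_file_content_py section_ → Spec_extract_new_file_content_py section_ (extract_new_file_content_py section_)

-- ===== LEMMAS AND PROOFS =====

-- a line starting with "@@" does not start with "+"
theorem pv_at_not_plus (s : String) (h : PySem.Str.startswith s "@@" = true) :
    PySem.Str.startswith s "+" = false := by
  rw [PySem.Str.startswith_eq] at h ⊢
  rw [show ("@@".toList) = ['@', '@'] from rfl, PySem.Chars.startswith_iff] at h
  rw [show ("+".toList) = ['+'] from rfl]
  obtain ⟨t, ht⟩ := h
  by_contra hp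
  rw [Bool.not_eq_false, PySem.Chars.startswith_iff] at hp
  obtain ⟨t2, ht2⟩ := hp
  rw [← ht] at ht2
  simp at ht2

theorem pv_stepA_at (st : Bool × List String) (l : String)
    (h : PySem.Str.startswith l "@@" = true) : pvStepA st l = (true, st.2) := by
  unfold pvStepA; rw [if_pos h]

theorem pv_stepA_plus (acc : List String) (l : String)
    (h : ¬ PySem.Str.startswith l "@@" = true) (hp : PySem.Str.startswith l "+" = true) :
    pvStepA (true, acc) l = (true, acc ++ [PySem.Str.slice l (some 1) none]) := by
  unfold pvStepA; rw [if_neg h, hp]; simp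

theorem pv_stepA_skip (fl : Bool) (acc : List String) (l : String)
    (h : ¬ PySem.Str.startswith l "@@" = true) (hp : ¬ PySem.Str.startswith l "+" = true) :
    pvStepA (fl, acc) l = (fl, acc) := by
  unfold pvStepA
  rw [if_neg h, eq_false_of_ne_true hp]
  simp

theorem pv_stepA_false (acc : List String) (l : String)
    (h : ¬ PySem.Str.startswith l "@@" = true) : pvStepA (false, acc) l = (false, acc) := by
  unfold pvStepA; rw [if_neg h]; simp

-- once the flag is true, the fold filters '+' lines and appends their tails
theorem pv_foldA_true (lines : List String) (acc : List String) :
    lines.foldl pvStepA (true, acc) =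
      (true, acc ++ (lines.filter (fun l => PySem.Str.startswith l "+")).map
        (fun l => PySem.Str.slice l (some 1) none)) := by
  induction lines generalizing acc with
  | nil => simp
  | cons l rest ih =>
    simp only [List.foldl_cons, List.filter_cons]
    by_cases h : PySem.Str.startswith l "@@" = true
    · rw [pv_stepA_at _ _ h, if_neg (by rw [pv_at_not_plus l h]; simp)]
      exact ih acc
    · by_cases hp : PySem.Str.startswith l "+" = true
      · rw [pv_stepA_plus acc l h hp, if_pos hp, ih]
        simp
      · rw [pv_stepA_skip true acc l h hp, if_neg hp]
        exact ih acc

-- with the flag false, the fold drops lines until the first '@@' header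
theorem pv_foldA_false (lines : List String) :
    lines.foldl pvStepA (false, []) =
      match lines.dropWhile (fun l => !PySem.Str.startswith l "@@") with
      | [] => (false, [])
      | _ :: rest => (true, (rest.filter (fun l => PySem.Str.startswith l "+")).map
          (fun l => PySem.Str.slice l (some 1) none)) := by
  induction lines with
  | nil => simp
  | cons l rest ih =>
    by_cases h : PySem.Str.startswith l "@@" = true
    · rw [List.foldl_cons, pv_stepA_at _ _ h,
        List.dropWhile_cons_of_neg (by rw [h]; decide)]
      simpa using pv_foldA_true rest []
    · rw [List.foldl_cons, pv_stepA_false [] l h,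
        List.dropWhile_cons_of_pos (by simp only [Bool.not_eq_eq_eq_not, Bool.not_true]; exact eq_false_of_ne_true h)]
      exact ih

-- ===== VERDICT (by name: the statement is the Claim_ definition above) =====
theorem extract_new_file_content_py_spec : Claim_equal_extract_new_file_content_py := by
  intro section_ _
  unfold Spec_extract_new_file_content_py extract_new_file_content_py extract_new_file_content_py_alt
  simp only [pv_foldA_false]
  cases h : ((PySem.Str.split? section_ "\n").getD []).dropWhile (fun l => !PySem.Str.startswith l "@@") with
  | nil => decide
  | cons a rest => rfl
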